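-- pv_equiv track=rewrite | github.com/miliar/Code_Jam_Webscraper | solutions_python/solutions_year15_round0_nr1/1382.py | solve
-- ===== SOURCE A (Python) =====
-- def cumsum(arr):
-- 	numArr = [int(each) for each in arr]
-- 	l = [0]*len(numArr)
-- 	l[0] = numArr[0]
-- 	for i in range(1, len(arr)):
-- 		l[i] = l[i-1] + numArr[i]
-- 	return l
--
-- def solve(arr):
-- 	ans = 0
-- 	if arr[0] == '0':
-- 		ans += 1
-- 		arr = '1' + arr[1:]
-- 	l = cumsum(arr)
-- 	for i in range(1, len(arr)):
-- 		if l[i] < i+1: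
-- 			if l[i-1] + int(arr[i]) >= i+1:
-- 				l[i] = l[i-1] + int(arr[i])
-- 				continue
-- 			#the previous guy was also lacking
-- 			#then assume it to have been corrected to its mimimum.
-- 			if l[i-1] < i:
-- 				ans += 1
-- 				l[i] = i+1
-- 			else:
-- 				ans += 1
-- 				l[i] = i+1
-- 		else:
-- 			l[i] = l[i-1] + int(arr[i])
-- 	return ans
-- ===== SOURCE B (Python) =====
-- # Record-counting formulation: the answer is the number of strict record highs of the
-- # running deficit sequence v_i = (i+1) - prefix_sum_i (baseline 0), plus one if the
-- # first digit was '0'. Computed in staged passes: prefix sums, deficit list,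
-- # prefix-maxima scan, count of strict increases.
-- def solve(arr):
--     ans0 = 1 if arr[0] == '0' else 0
--     digits = [1 if ans0 else int(arr[0])] + [int(c) for c in arr[1:]]
--     s = []
--     t = 0
--     for d in digits:
--         t += d
--         s.append(t)
--     deficits = [i + 1 - s[i] for i in range(1, len(digits))]
--     maxima = [0]
--     for v in deficits:
--         maxima.append(max(maxima[-1], v))
--     return ans0 + sum(1 for a, b in zip(maxima, maxima[1:]) if b > a)
-- ===== Notes on version B (the rewrite author's own statement) =====
-- stated objective: alternative
-- what changed: Replaces A's greedy simulation that patches a cumsum table in place with a record-counting formulation: build the deficit sequence v_i = (i+1) - prefix_sum_i in staged passes (recursive prefix sums, deficit list, prefix-maxima scan) and count its strict record highs above 0.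
import Mathlib
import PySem

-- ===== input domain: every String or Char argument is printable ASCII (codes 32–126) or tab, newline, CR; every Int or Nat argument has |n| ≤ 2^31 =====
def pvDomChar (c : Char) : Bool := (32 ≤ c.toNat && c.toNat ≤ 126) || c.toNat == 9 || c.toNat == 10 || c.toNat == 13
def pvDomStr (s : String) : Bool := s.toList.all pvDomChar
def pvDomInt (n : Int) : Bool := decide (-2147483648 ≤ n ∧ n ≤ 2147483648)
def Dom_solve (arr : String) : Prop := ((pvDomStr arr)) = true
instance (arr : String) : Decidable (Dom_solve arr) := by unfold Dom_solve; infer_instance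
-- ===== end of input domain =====

-- B replaces A's greedy in-place cumsum patching with a record-counting formulation:
-- the answer is the number of strict record highs (above 0) of the deficit sequence
-- v_i = (i+1) - prefix_sum_i, computed in staged passes (objective: alternative).

-- int(c) for a single character c (Pre_solve guarantees it is a digit, so the default is never used)
def pvDigit (c : Char) : Int := (PySem.Int.ofStr? (String.ofList [c])).getD 0

-- ===== PORT A =====
-- cumsum: l = [0]*len; l[0] = num[0]; for i in range(1,len): l[i] = l[i-1] + num[i]
-- (indices are Nats always in range, so List.set / List.getD are exact here)
def cumsumA (numArr : List Int) : List Int :=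
  let l0 := (List.replicate numArr.length (0 : Int)).set 0 (numArr.getD 0 0)
  (List.range' 1 (numArr.length - 1)).foldl
    (fun l i => l.set i (l.getD (i - 1) 0 + numArr.getD i 0)) l0

def solveStepA (chars : List Char) (st : Int × List Int) (i : Nat) : Int × List Int :=
  let ans := st.1
  let l := st.2
  let d := pvDigit (chars.getD i '0')
  if l.getD i 0 < (i : Int) + 1 then
    if l.getD (i - 1) 0 + d ≥ (i : Int) + 1 then (ans, l.set i (l.getD (i - 1) 0 + d))
    else if l.getD (i - 1) 0 < (i : Int) then (ans + 1, l.set i ((i : Int) + 1))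
    else (ans + 1, l.set i ((i : Int) + 1))
  else (ans, l.set i (l.getD (i - 1) 0 + d))

def solve (arr : String) : Int :=
  match PySem.List.pyGet? arr.toList 0 with
  | none => 0   -- arr[0] raises IndexError in Python; excluded by Pre_solve
  | some c0 =>
    let (ans0, chars) : Int × List Char :=
      if c0 = '0' then (1, '1' :: arr.toList.drop 1) else (0, arr.toList)
    let l := cumsumA (chars.map pvDigit)
    ((List.range' 1 (chars.length - 1)).foldl (solveStepA chars) (ans0, l)).1

-- ===== PORT B =====
def solve_alt (arr : String) : Int :=
  match arr.toList with
  | [] => 0   -- arr[0] raises IndexError in Python; excluded by Pre_solve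
  | c0 :: restC =>
    let ans0 : Int := if c0 = '0' then 1 else 0
    let digits : List Int := (if c0 = '0' then 1 else pvDigit c0) :: restC.map pvDigit
    -- s = []; t = 0; for d in digits: t += d; s.append(t)
    let s := (digits.foldl (fun (p : List Int × Int) d => (p.1 ++ [p.2 + d], p.2 + d))
      (([] : List Int), (0 : Int))).1
    let deficits := (List.range' 1 (digits.length - 1)).map
      (fun (i : Nat) => (i : Int) + 1 - s.getD i 0)
    -- maxima = [0]; for v in deficits: maxima.append(max(maxima[-1], v))
    let maxima := deficits.foldl
      (fun m v => m ++ [max ((PySem.List.pyGet? m (-1)).getD 0) v]) [(0 : Int)]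
    ans0 + ((maxima.zip (maxima.drop 1)).map (fun p => if p.1 < p.2 then (1 : Int) else 0)).sum

-- ===== PRECONDITION & SPEC =====
-- Pre_solve: exactly the inputs where Python A returns (nonempty all-digit string);
-- on the empty string arr[0] raises IndexError, on a non-digit character int() raises ValueError.
def Pre_solve (arr : String) : Prop := PySem.Str.strIsdigit arr = true
instance (arr : String) : Decidable (Pre_solve arr) := by unfold Pre_solve; infer_instance

def pvWitness_solve : String := "10"

def Spec_solve (arr : String) (out : Int) : Prop := out = solve_alt arr
instance (arr : String) (out : Int) : Decidable (Spec_solve arr out) := by unfold Spec_solve; infer_instance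

-- ===== CLAIM (what is proved, stated in full; the proofs are below) =====
def Claim_equal_solve : Prop := ∀ (arr : String), Dom_solve arr → Pre_solve arr → Spec_solve arr (solve arr)

-- ===== LEMMAS AND PROOFS =====

-- intermediate streaming greedy (proof device bridging A and B)
def streamStep (st : Int × Int) (di : Int × Nat) : Int × Int :=
  if st.2 + di.1 < (di.2 : Int) + 1 then (st.1 + 1, (di.2 : Int) + 1) else (st.1, st.2 + di.1)

-- recursive characterizations of B's two append loops (proof devices)
def pvSums : List Int → Int → List Int
  | [], _ => []
  | d :: t, acc => (acc + d) :: pvSums t (acc + d)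

def pvMaxscan : List Int → Int → List Int
  | [], m => [m]
  | v :: t, m => m :: pvMaxscan t (max m v)

theorem sums_loop_eq (ds : List Int) (p : List Int) (t : Int) :
    (ds.foldl (fun (q : List Int × Int) d => (q.1 ++ [q.2 + d], q.2 + d)) (p, t)).1
      = p ++ pvSums ds t := by
  induction ds generalizing p t with
  | nil => simp [pvSums]
  | cons d rest ih =>
    rw [List.foldl_cons]
    simp only [pvSums]
    rw [ih (p ++ [t + d]) (t + d), List.append_assoc]
    rfl

theorem max_loop_eq (vs : List Int) (p : List Int) (x : Int) :
    vs.foldl (fun m v => m ++ [max ((PySem.List.pyGet? m (-1)).getD 0) v]) (p ++ [x])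
      = p ++ pvMaxscan vs x := by
  induction vs generalizing p x with
  | nil => simp [pvMaxscan]
  | cons v t ih =>
    rw [List.foldl_cons, PySem.List.pyGet?_neg_one_append_singleton]
    simp only [Option.getD_some]
    rw [ih (p ++ [x]) (max x v), List.append_assoc]
    simp [pvMaxscan]

-- record-counting step (proof device equal to B's staged passes)
def recStep (st : Int × Int) (v : Int) : Int × Int :=
  if st.2 < v then (st.1 + 1, v) else (st.1, st.2)

-- deficit list of a digit tail starting at index i with running sum s
def defList : List Int → Nat → Int → List Int
  | [], _, _ => []
  | d :: t, i, s => ((i : Int) + 1 - (s + d)) :: defList t (i + 1) (s + d)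

-- prefix sum of the first j+1 digit values
def pvCum (num : List Int) (j : Nat) : Int := (num.take (j + 1)).sum

theorem pv_getD_set (l : List Int) (i j : Nat) (v : Int) :
    (l.set i v).getD j 0 = if i = j ∧ i < l.length then v else l.getD j 0 := by
  rw [List.getD_eq_getElem?_getD, List.getElem?_set]
  split_ifs with h1 h2 h3
  all_goals simp_all [List.getD_eq_getElem?_getD]
  all_goals omega

theorem pvCum_succ (num : List Int) (j : Nat) (h1 : 1 ≤ j) (h2 : j < num.length) :
    pvCum num j = pvCum num (j - 1) + num.getD j 0 := by
  unfold pvCum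
  have hj : j - 1 + 1 = j := by omega
  rw [hj, List.getD_eq_getElem?_getD, List.getElem?_eq_getElem h2]
  exact List.sum_take_succ num j h2

-- cumsumA's fold fills the table with prefix sums
theorem cumsum_inv (num : List Int) (k i : Nat) (l : List Int)
    (hlen : l.length = num.length) (hi : 1 ≤ i) (hik : i + k = num.length)
    (hprev : ∀ j, j < i → l.getD j 0 = pvCum num j) :
    ((List.range' i k).foldl
        (fun l i => l.set i (l.getD (i - 1) 0 + num.getD i 0)) l).length = num.length ∧
      ∀ j, j < num.length →
        ((List.range' i k).foldl
          (fun l i => l.set i (l.getD (i - 1) 0 + num.getD i 0)) l).getD j 0 = pvCum num j := by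
  induction k generalizing i l with
  | zero =>
    simp only [List.range'_zero, List.foldl_nil]
    exact ⟨hlen, fun j hj => hprev j (by omega)⟩
  | succ k ih =>
    rw [List.range'_succ, List.foldl_cons]
    have hilen : i < num.length := by omega
    refine ih (i + 1) _ (by rw [List.length_set]; exact hlen) (by omega) (by omega) ?_
    intro j hj
    rw [pv_getD_set]
    by_cases hji : i = j
    · subst hji
      rw [if_pos ⟨rfl, by omega⟩, hprev (i - 1) (by omega), ← pvCum_succ num i hi hilen]
    · rw [if_neg (fun h => hji h.1)]
      exact hprev j (by omega)

-- main invariant: A's table fold agrees with the streaming fold over digit values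
theorem main_inv (chars : List Char) (k i : Nat) (ans corr : Int) (l : List Int)
    (hi : 1 ≤ i) (hik : i + k = chars.length)
    (hlen : l.length = chars.length)
    (hcum : ∀ j, i ≤ j → j < chars.length → l.getD j 0 = pvCum (chars.map pvDigit) j)
    (hcorr : l.getD (i - 1) 0 = corr)
    (hge : pvCum (chars.map pvDigit) (i - 1) ≤ corr) :
    ((List.range' i k).foldl (solveStepA chars) (ans, l)).1
      = ((((chars.drop i).map pvDigit).zipIdx i).foldl streamStep (ans, corr)).1 := by
  induction k generalizing i ans corr l with
  | zero =>
    simp [List.range'_zero, List.drop_eq_nil_of_le (by omega : chars.length ≤ i)]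
  | succ k ih =>
    have hil : i < chars.length := by omega
    rw [List.range'_succ, List.foldl_cons, List.drop_eq_getElem_cons hil, List.map_cons,
      List.zipIdx_cons, List.foldl_cons]
    have hnumi : (chars.map pvDigit).getD i 0 = pvDigit chars[i] := by
      simp [List.getD_eq_getElem?_getD, hil]
    have hli : l.getD i 0 = pvCum (chars.map pvDigit) i := hcum i (le_refl i) hil
    have hcums : pvCum (chars.map pvDigit) i
        = pvCum (chars.map pvDigit) (i - 1) + pvDigit chars[i] := by
      rw [pvCum_succ (chars.map pvDigit) i hi (by simpa using hil), hnumi]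
    have hd : chars.getD i '0' = chars[i] := List.getD_eq_getElem chars '0' hil
    have hset : ∀ v : Int, (l.set i v).getD (i + 1 - 1) 0 = v := by
      intro v
      rw [Nat.add_sub_cancel, pv_getD_set, if_pos ⟨rfl, by omega⟩]
    have hcum' : ∀ (v : Int) j, i + 1 ≤ j → j < chars.length →
        (l.set i v).getD j 0 = pvCum (chars.map pvDigit) j := by
      intro v j hj hjl
      rw [pv_getD_set, if_neg (fun h => by omega)]
      exact hcum j (by omega) hjl
    have hlen' : ∀ v : Int, (l.set i v).length = chars.length := by
      intro v; rw [List.length_set]; exact hlen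
    simp only [solveStepA, streamStep, hd, hli, hcorr]
    generalize hdg : pvDigit chars[i] = d at hcums
    generalize hcp : pvCum (chars.map pvDigit) (i - 1) = cp at hcums hge
    by_cases h1 : pvCum (chars.map pvDigit) i < (i : Int) + 1
    · rw [if_pos h1]
      by_cases h2 : corr + d ≥ (i : Int) + 1
      · rw [if_pos h2, if_neg (by omega)]
        exact ih (i + 1) ans (corr + d) _ (by omega) (by omega) (hlen' _) (hcum' _)
          (hset _) (by rw [Nat.add_sub_cancel]; omega)
      · rw [if_neg h2, ite_self, if_pos (by omega)]
        exact ih (i + 1) (ans + 1) ((i : Int) + 1) _ (by omega) (by omega) (hlen' _) (hcum' _)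
          (hset _) (by rw [Nat.add_sub_cancel]; omega)
    · rw [if_neg h1, if_neg (by omega)]
      exact ih (i + 1) ans (corr + d) _ (by omega) (by omega) (hlen' _) (hcum' _)
        (hset _) (by rw [Nat.add_sub_cancel]; omega)

-- solve equals the streaming greedy on the digit values
theorem solve_eq_stream (arr : String) (c0 : Char) (rest : List Char)
    (harr : arr.toList = c0 :: rest) :
    solve arr
      = (((rest.map pvDigit).zipIdx 1).foldl streamStep
          ((if c0 = '0' then 1 else 0), if c0 = '0' then 1 else pvDigit c0)).1 := by
  unfold solve
  rw [harr, PySem.List.pyGet?_zero_cons]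
  have key : ∀ (ans0 : Int) (chars : List Char),
      chars.length = rest.length + 1 → chars.drop 1 = rest →
      ((List.range' 1 (chars.length - 1)).foldl (solveStepA chars)
          (ans0, cumsumA (chars.map pvDigit))).1
        = (((rest.map pvDigit).zipIdx 1).foldl streamStep
            (ans0, pvDigit (chars.getD 0 '0'))).1 := by
    intro ans0 chars hchl hchd
    have hn : chars.length = (chars.map pvDigit).length := by simp
    have hne : 1 ≤ chars.length := by omega
    have hcs := cumsum_inv (chars.map pvDigit) ((chars.map pvDigit).length - 1) 1
      ((List.replicate (chars.map pvDigit).length (0 : Int)).set 0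
        ((chars.map pvDigit).getD 0 0))
      (by simp) (le_refl 1) (by omega)
      (fun j hj => by
        interval_cases j
        rw [pv_getD_set, if_pos ⟨rfl, by simp; omega⟩]
        unfold pvCum
        have : (chars.map pvDigit).take 1 = [(chars.map pvDigit).getD 0 0] := by
          cases hc : chars with
          | nil => simp [hc] at hne
          | cons a t => simp
        rw [this]; simp)
    have h0 : pvCum (chars.map pvDigit) 0 = pvDigit (chars.getD 0 '0') := by
      unfold pvCum
      cases hc : chars with
      | nil => rw [hc] at hchl; simp at hchl
      | cons a t => simp
    have hmain := main_inv chars (chars.length - 1) 1 ans0 (pvDigit (chars.getD 0 '0'))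
      (cumsumA (chars.map pvDigit)) (le_refl 1) (by omega)
      (by unfold cumsumA; exact (hn ▸ hcs.1))
      (fun j hj hjl => by unfold cumsumA; exact hcs.2 j (by omega))
      ?_ ?_
    · rw [hmain, hchd]
    · unfold cumsumA
      rw [hcs.2 0 (by omega)]
      exact h0
    · exact le_of_eq h0
  dsimp only
  simp only [List.drop_succ_cons, List.drop_zero]
  by_cases hc0 : c0 = '0'
  · simp only [if_pos hc0]
    refine (key 1 ('1' :: rest) (by simp) (by simp)).trans ?_
    have h1 : pvDigit (('1' :: rest).getD 0 '0') = 1 := by simp [List.getD]; decide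
    rw [h1]
  · simp only [if_neg hc0]
    exact (key 0 (c0 :: rest) (by simp) (by simp)).trans (by simp [List.getD])

-- streaming greedy equals the record-counting fold over the deficits
theorem stream_eq_rec (ds : List Int) (i : Nat) (ans s best : Int) :
    ((ds.zipIdx i).foldl streamStep (ans, s + best)).1
      = ((defList ds i s).foldl recStep (ans, best)).1 := by
  induction ds generalizing i ans s best with
  | nil => simp [defList]
  | cons d t ih =>
    rw [List.zipIdx_cons, List.foldl_cons]
    simp only [defList, List.foldl_cons, streamStep, recStep]
    by_cases h : s + best + d < (i : Int) + 1
    · rw [if_pos h, if_pos (by omega)]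
      have h2 := ih (i + 1) (ans + 1) (s + d) ((i : Int) + 1 - (s + d))
      rw [show (s + d) + ((i : Int) + 1 - (s + d)) = (i : Int) + 1 by ring] at h2
      exact h2
    · rw [if_neg h, if_neg (by omega)]
      have h2 := ih (i + 1) ans (s + d) best
      rw [show (s + d) + best = s + best + d by ring] at h2
      exact h2

-- B's staged deficit list (index-map over the prefix-sum table) is defList
theorem pvSums_getD (full : List Int) (acc : Int) (j : Nat) (hj : j < full.length) :
    (pvSums full acc).getD j 0 = acc + (full.take (j + 1)).sum := by
  induction full generalizing acc j with
  | nil => simp at hj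
  | cons d t ih =>
    cases j with
    | zero => simp [pvSums, List.getD]
    | succ j =>
      simp only [pvSums, List.getD_cons_succ, List.take_succ_cons, List.sum_cons]
      rw [ih (acc + d) j (by simpa using hj)]
      ring

theorem defList_eq_map (full t : List Int) (i : Nat)
    (hdrop : full.drop i = t) (hi : i ≤ full.length) (hi1 : 1 ≤ i) :
    (List.range' i t.length).map (fun (j : Nat) => (j : Int) + 1 - (pvSums full 0).getD j 0)
      = defList t i ((full.take i).sum) := by
  induction t generalizing i with
  | nil => simp [defList]
  | cons d rest ih =>
    have hil : i < full.length := by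
      by_contra h
      rw [List.drop_eq_nil_of_le (by omega)] at hdrop
      exact (List.cons_ne_nil d rest) hdrop.symm
    rw [List.length_cons, List.range'_succ, List.map_cons]
    simp only [defList]
    have hd : full.getD i 0 = d := by
      have := congrArg (fun l => List.getD l 0 0) hdrop
      simpa [List.getD_eq_getElem?_getD, List.getElem?_drop, hil] using this
    have htake : (full.take (i + 1)).sum = (full.take i).sum + d := by
      have := List.sum_take_succ full i hil
      rw [this]
      congr 1
      rw [List.getD_eq_getElem?_getD, List.getElem?_eq_getElem hil] at hd
      simpa using hd
    congr 1
    · rw [pvSums_getD full 0 i hil, htake]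
      ring
    · rw [← htake]
      refine ih (i + 1) ?_ (by omega) (by omega)
      have := congrArg List.tail hdrop
      simpa [List.tail_drop] using this
    
-- record fold's count starts where it starts
theorem recStep_shift (vs : List Int) (c m : Int) :
    (vs.foldl recStep (c, m)).1 = c + (vs.foldl recStep (0, m)).1 := by
  induction vs generalizing c m with
  | nil => simp
  | cons v t ih =>
    simp only [List.foldl_cons, recStep]
    by_cases h : m < v
    · rw [if_pos h, if_pos h, ih (c + 1), ih (0 + 1)]
      ring
    · rw [if_neg h, if_neg h, ih c]

-- B's maxima/zip/count equals the record-counting fold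
theorem maxscan_eq_rec (vs : List Int) (m : Int) :
    (((pvMaxscan vs m).zip ((pvMaxscan vs m).drop 1)).map
        (fun p => if p.1 < p.2 then (1 : Int) else 0)).sum
      = (vs.foldl recStep (0, m)).1 := by
  induction vs generalizing m with
  | nil => simp [pvMaxscan]
  | cons v t ih =>
    obtain ⟨a, l, hal⟩ : ∃ a l, pvMaxscan t (max m v) = a :: l := by
      cases t <;> exact ⟨_, _, rfl⟩
    have ha : a = max m v := by
      cases t <;> simp [pvMaxscan] at hal <;> tauto
    have ih' := ih (max m v)
    rw [hal] at ih'
    simp only [List.drop_succ_cons, List.drop_zero] at ih'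
    simp only [pvMaxscan, hal, List.drop_succ_cons, List.drop_zero, List.zip_cons_cons,
      List.map_cons, List.sum_cons, List.foldl_cons, recStep]
    rw [ih']
    subst ha
    by_cases h : m < v
    · rw [if_pos (by omega : m < max m v), if_pos h, max_eq_right h.le,
        recStep_shift t (0 + 1) v]
      ring
    · rw [if_neg (by omega : ¬ m < max m v), if_neg h, max_eq_left (by omega)]
      simp

theorem solve_eq (arr : String) : solve arr = solve_alt arr := by
  cases harr : arr.toList with
  | nil => unfold solve solve_alt; rw [harr]; simp [PySem.List.pyGet?]
  | cons c0 rest =>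
    rw [solve_eq_stream arr c0 rest harr]
    unfold solve_alt
    rw [harr]
    dsimp only
    set a0 : Int := if c0 = '0' then 1 else 0 with ha0
    set d0 : Int := if c0 = '0' then 1 else pvDigit c0 with hd0
    set digits : List Int := d0 :: rest.map pvDigit with hdig
    have hs := sums_loop_eq digits [] 0
    simp only [List.nil_append] at hs
    rw [hs]
    have hlen : digits.length - 1 = (rest.map pvDigit).length := by simp [hdig]
    have hdrop : digits.drop 1 = rest.map pvDigit := by simp [hdig]
    have htake : (digits.take 1).sum = d0 := by simp [hdig]
    have hdef := defList_eq_map digits (rest.map pvDigit) 1 hdrop (by simp [hdig]) (le_refl 1)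
    rw [htake] at hdef
    have hm := max_loop_eq (defList (rest.map pvDigit) 1 d0) [] 0
    simp only [List.nil_append] at hm
    rw [hlen, hdef, hm, maxscan_eq_rec,
      ← recStep_shift (defList (rest.map pvDigit) 1 d0) a0 0,
      ← stream_eq_rec (rest.map pvDigit) 1 a0 d0 0, add_zero]

-- ===== VERDICT (by name: the statement is the Claim_ definition above) =====
theorem solve_spec : Claim_equal_solve := by
  intro arr _ _
  unfold Spec_solve
  exact solve_eq arr
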